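-- pv_equiv track=rewrite | github.com/UdhaikumarMohan/Strings-and-Pattern | freq of char/k_repeated.py | rep_word
-- ===== SOURCE A (Python) =====
-- def rep_word(String,k):
--
--     freq = {}
--
--     Sentence = String.split()
--
--     for a in Sentence:
--
--         if a in freq:
--
--             freq[a]+=1
--
--         else:
--
--             freq[a]=1
--
--     li=[]
--
--
--     for a in freq:
--
--         if freq[a]==k:
--
--             li.append(a)
--
--     return li
-- ===== SOURCE B (Python) =====
-- def rep_word(String, k):
--     li = []
--     words = String.split()
--     for a in words:
--         if a not in li and words.count(a) == k:
--             li.append(a)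
--     return li
-- ===== Notes on version B (the rewrite author's own statement) =====
-- stated objective: simpler
-- what changed: Replaced the frequency dict and second pass over its keys by a single ordered pass over the word list that dedups via membership in the result and tests each word's count directly with list.count.
import Mathlib
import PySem

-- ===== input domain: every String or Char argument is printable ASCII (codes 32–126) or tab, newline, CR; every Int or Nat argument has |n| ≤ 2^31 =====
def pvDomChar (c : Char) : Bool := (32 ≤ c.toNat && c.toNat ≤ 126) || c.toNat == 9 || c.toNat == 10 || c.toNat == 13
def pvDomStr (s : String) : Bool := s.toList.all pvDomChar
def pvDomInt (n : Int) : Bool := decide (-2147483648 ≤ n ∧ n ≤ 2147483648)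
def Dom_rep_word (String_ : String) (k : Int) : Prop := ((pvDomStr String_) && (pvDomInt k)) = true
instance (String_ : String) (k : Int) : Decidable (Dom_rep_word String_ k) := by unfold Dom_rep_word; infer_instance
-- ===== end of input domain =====

-- B replaces A's frequency dict + key pass by one ordered pass over the word list,
-- deduping via membership in the result and testing counts with list.count (simpler, not faster).


-- ===== PORT A =====
def rep_word (String_ : String) (k : Int) : List String :=
  let Sentence := PySem.Str.split₀ String_
  let freq : PySem.Dict String Int :=
    Sentence.foldl (fun d a =>
      if d.contains a then d.insert a (d.getD a 0 + 1) else d.insert a 1)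
      PySem.Dict.empty
  freq.keys.foldl (fun li a => if freq.getD a 0 == k then li ++ [a] else li) []

-- ===== PORT B =====
def rep_word_alt (String_ : String) (k : Int) : List String :=
  let words := PySem.Str.split₀ String_
  words.foldl (fun li a =>
    if !(li.contains a) && ((PySem.List.count words a : Int) == k) then li ++ [a] else li) []

-- ===== PRECONDITION & SPEC =====
def Spec_rep_word (String_ : String) (k : Int) (out : List String) : Prop := out = rep_word_alt String_ k
instance (String_ : String) (k : Int) (out : List String) : Decidable (Spec_rep_word String_ k out) := by unfold Spec_rep_word; infer_instance

-- ===== CLAIM (what is proved, stated in full; the proofs are below) =====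
def Claim_equal_rep_word : Prop := ∀ (String_ : String) (k : Int), Dom_rep_word String_ k → Spec_rep_word String_ k (rep_word String_ k)

-- ===== LEMMAS AND PROOFS =====

-- A's building loop is exactly Counter(words).
theorem pv_freq_eq_counter (xs : List String) :
    xs.foldl (fun d a =>
      if d.contains a then d.insert a (d.getD a 0 + 1) else d.insert a 1)
      PySem.Dict.empty = PySem.Dict.counter xs := by
  have hfun : (fun (d : PySem.Dict String Int) a =>
      if d.contains a then d.insert a (d.getD a 0 + 1) else d.insert a 1)
      = (fun d a => d.insert a (d.getD a 0 + 1)) := by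
    funext d a
    by_cases h : d.contains a = true
    · simp [h]
    · have h0 : d.getD a 0 = 0 := by
        simp [PySem.Dict.getD_of_not_contains, (by simpa using h : d.contains a = false)]
      simp [h, h0]
  rw [hfun, PySem.Dict.foldl_insert_getD_add_one_eq_counter]

-- B's loop: ordered dedup-with-filter over xs equals filtering the ordered dedup.
theorem pv_dedup_filter (p : String → Bool) (xs : List String) :
    xs.foldl (fun li a => if !(li.contains a) && p a then li ++ [a] else li) []
      = (PySem.Set.ofList xs).filter p := by
  induction xs using List.reverseRecOn with
  | nil => rfl
  | append_singleton ys x ih =>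
    rw [List.foldl_append, List.foldl_cons, List.foldl_nil, ih,
        PySem.Set.ofList_append_singleton]
    by_cases hx : x ∈ ys
    · have hadd : PySem.Set.add (PySem.Set.ofList ys) x = PySem.Set.ofList ys := by
        simp [PySem.Set.add, PySem.Set.mem_ofList, hx]
      rw [hadd]
      by_cases hp : p x = true
      · simp only [List.contains_eq_mem, List.mem_filter, PySem.Set.mem_ofList]
        rw [if_neg (by simp [hx, hp])]
      · simp [hp]
    · have hadd : PySem.Set.add (PySem.Set.ofList ys) x = PySem.Set.ofList ys ++ [x] := by
        simp [PySem.Set.add, PySem.Set.mem_ofList, hx]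
      rw [hadd, List.filter_append]
      by_cases hp : p x = true
      · simp [hp]
        exact hx
      · simp [hp]

-- ===== VERDICT (by name: the statement is the Claim_ definition above) =====
theorem rep_word_spec : Claim_equal_rep_word := by
  intro String_ k _
  unfold Spec_rep_word rep_word rep_word_alt
  simp only [pv_freq_eq_counter, pv_dedup_filter]
  rw [PySem.Dict.keys_counter,
      PySem.List.foldl_append_if_eq_filter]
  simp only [List.nil_append]
  apply List.filter_congr
  intro a _
  rw [PySem.Dict.getD_counter]
  rfl
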